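-- pv_equiv track=rewrite | github.com/mortenlyn/AdventOfCode | adventofcode2015python/day11/main.py | first_req
-- ===== SOURCE A (Python) =====
-- def first_req(data):
--     for i in range(len(data) - 2):
--         current_letter = ord(data[i])
--         next_letter = ord(data[i+1])
--         second_next_letter = ord(data[i+2])
--         if (next_letter == (current_letter + 1)) and (second_next_letter == (next_letter + 1)):
--             return True
--
--     return False
-- ===== SOURCE B (Python) =====
-- def first_req(data):
--     count = 0
--     for i in range(1, len(data)):
--         if ord(data[i]) == ord(data[i - 1]) + 1:
--             count += 1
--             if count == 2:
--                 return True
--         else: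
--             count = 0
--     return False
-- ===== Notes on version B (the rewrite author's own statement) =====
-- stated objective: alternative
-- what changed: B scans adjacent pairs once maintaining a run counter of consecutive +1 steps (returning True when it reaches 2) instead of A's window of three fixed indices per position.
import Mathlib
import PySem

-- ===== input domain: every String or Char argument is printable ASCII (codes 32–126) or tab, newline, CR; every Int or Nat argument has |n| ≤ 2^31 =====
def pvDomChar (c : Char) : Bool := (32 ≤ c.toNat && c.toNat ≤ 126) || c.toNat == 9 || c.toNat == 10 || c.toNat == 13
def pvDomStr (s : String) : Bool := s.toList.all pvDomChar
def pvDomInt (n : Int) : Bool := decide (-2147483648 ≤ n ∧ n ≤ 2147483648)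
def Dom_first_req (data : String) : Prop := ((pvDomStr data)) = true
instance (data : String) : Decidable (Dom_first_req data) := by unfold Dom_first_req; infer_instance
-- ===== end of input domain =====

-- B replaces A's fixed three-index window with a single pair scan keeping a run counter of consecutive +1 steps (objective: alternative decomposition).


-- ===== PORT A =====
-- A's loop reads data[i], data[i+1], data[i+2] for each i; the obvious structural
-- recursion over the character list reads the same three chars per step.
def firstReqA : List Char → Bool
  | a :: b :: c :: rest =>
      if b.toNat == a.toNat + 1 && c.toNat == b.toNat + 1 then true
      else firstReqA (b :: c :: rest)
  | _ => false

def first_req (data : String) : Bool := firstReqA data.toList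

-- ===== PORT B =====
-- B's loop over i in range(1, len): prev = data[i-1], counter of consecutive +1 steps.
def firstReqB : Char → Nat → List Char → Bool
  | _, _, [] => false
  | prev, count, c :: rest =>
      if c.toNat == prev.toNat + 1 then
        if count + 1 == 2 then true else firstReqB c (count + 1) rest
      else firstReqB c 0 rest

def first_req_alt (data : String) : Bool :=
  match data.toList with
  | [] => false
  | c :: rest => firstReqB c 0 rest

-- ===== PRECONDITION & SPEC =====
def Spec_first_req (data : String) (out : Bool) : Prop := out = first_req_alt data
instance (data : String) (out : Bool) : Decidable (Spec_first_req data out) := by unfold Spec_first_req; infer_instance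

-- ===== CLAIM (what is proved, stated in full; the proofs are below) =====
def Claim_equal_first_req : Prop := ∀ (data : String), Dom_first_req data → Spec_first_req data (first_req data)

-- ===== LEMMAS AND PROOFS =====

lemma firstReqB_key (l : List Char) : ∀ b : Char,
    (firstReqB b 0 l = firstReqA (b :: l)) ∧
    (firstReqB b 1 l =
      ((match l with | [] => false | c :: _ => (c.toNat == b.toNat + 1)) || firstReqA l)) := by
  induction l with
  | nil => intro b; simp [firstReqB, firstReqA]
  | cons c rest ih =>
    intro b
    constructor
    · -- count = 0
      match rest with
      | [] =>
        by_cases h : c.toNat == b.toNat + 1 <;> simp [firstReqB, firstReqA, h]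
      | d :: r =>
        by_cases h : c.toNat == b.toNat + 1
        · have h2 := (ih c).2
          by_cases hd : d.toNat == c.toNat + 1
          · simp [firstReqB, firstReqA, h, hd]
          · simp only [firstReqB, h, hd, if_true] at h2 ⊢
            simp at h2 ⊢
            rw [h2]
            match r with
            | [] =>
              simp [firstReqA]
              exact fun _ => by simpa using hd
            | e :: r2 => simp [firstReqA, hd]
        · have h1 := (ih c).1
          simp [firstReqB, firstReqA, h] at h1 ⊢
          exact h1
    · -- count = 1
      by_cases h : c.toNat == b.toNat + 1
      · simp [firstReqB, h]
      · simp [firstReqB, h, (ih c).1]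

lemma first_req_eq (data : String) : first_req data = first_req_alt data := by
  unfold first_req first_req_alt
  match data.toList with
  | [] => rfl
  | c :: rest => exact ((firstReqB_key rest c).1).symm

-- ===== VERDICT (by name: the statement is the Claim_ definition above) =====
theorem first_req_spec : Claim_equal_first_req := by
  intro data _
  unfold Spec_first_req
  exact first_req_eq data
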